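-- pv_equiv track=rewrite | github.com/Lscheinman/ai-pmo | backend/setup/utils.py | _group_ids_by_model
-- ===== SOURCE A (Python) =====
-- def _group_ids_by_model(ids: list[str]) -> dict[str, list[int]]:
--     grouped: dict[str, list[int]] = {}
--     for eid in ids:
--         typ, num = eid.split("_", 1)
--         try:
--             n = int(num)
--         except ValueError:
--             continue
--         grouped.setdefault(typ, []).append(n)
--     for k, vs in grouped.items():
--         grouped[k] = sorted(set(vs))
--     return grouped
-- ===== SOURCE B (Python) =====
-- def _group_ids_by_model(ids: list[str]) -> dict[str, list[int]]:
--     # Parse once into a flat (type, number) pair list, then build each group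
--     # at its type's first occurrence by a scan over the pair list.
--     pairs = []
--     for eid in ids:
--         typ, num = eid.split("_", 1)
--         try:
--             pairs.append((typ, int(num)))
--         except ValueError:
--             continue
--     grouped: dict[str, list[int]] = {}
--     for typ, _ in pairs:
--         if typ not in grouped:
--             grouped[typ] = sorted({n for t, n in pairs if t == typ})
--     return grouped
-- ===== Notes on version B (the rewrite author's own statement) =====
-- stated objective: alternative
-- what changed: B parses once into a flat (type, number) pair list and then, at each type's first occurrence, builds that whole group by a scan of the pair list (dedup via a set comprehension, one sorted call per type), instead of A's incremental setdefault/append dict followed by a second rewrite loop sorting each bucket.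
import Mathlib
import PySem

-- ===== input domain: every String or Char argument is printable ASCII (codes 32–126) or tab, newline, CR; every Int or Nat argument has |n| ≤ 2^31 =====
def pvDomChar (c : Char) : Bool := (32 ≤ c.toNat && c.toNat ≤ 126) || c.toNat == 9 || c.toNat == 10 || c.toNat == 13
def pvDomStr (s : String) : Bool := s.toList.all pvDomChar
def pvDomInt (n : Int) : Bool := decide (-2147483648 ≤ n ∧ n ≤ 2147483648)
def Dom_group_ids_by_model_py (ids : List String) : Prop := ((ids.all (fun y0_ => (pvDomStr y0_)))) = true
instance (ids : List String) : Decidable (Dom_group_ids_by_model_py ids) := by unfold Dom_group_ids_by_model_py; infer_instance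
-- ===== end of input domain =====

-- B regroups by a per-type scan of a flat pair list instead of A's incremental dict + per-bucket rewrite loop.

-- Shared parsing step (identical line in both Pythons): `typ, num = eid.split("_", 1)` then `int(num)`
-- under try. `none` = int() ValueError (the `continue`); the no-'_' unpack ValueError is excluded by Pre_.
def pvSplitInt (eid : String) : Option (String × Int) :=
  match PySem.Str.splitMax? eid "_" 1 with
  | some [typ, num] =>
    match PySem.Int.ofStr? num with
    | some n => some (typ, n)
    | none => none
  | _ => none

-- ===== PORT A =====
def group_ids_by_model_py (ids : List String) : List (String × List Int) :=
  -- first loop: grouped.setdefault(typ, []).append(n)  ==  modify typ [] (· ++ [n])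
  ((ids.foldl (fun d eid =>
      match pvSplitInt eid with
      | some p => d.modify p.1 [] (fun vs => vs ++ [p.2])
      | none => d) PySem.Dict.empty).items.map
    -- second loop: `for k, vs in grouped.items(): grouped[k] = sorted(set(vs))` reassigns each
    -- existing key in place, i.e. maps the value of every item
    (fun p => (p.1, PySem.List.sorted (PySem.Set.ofList p.2) (fun x => x) false)))

-- ===== PORT B =====
-- B's first loop: build the flat pair list
def pvPairsB (ids : List String) : List (String × Int) :=
  ids.foldl (fun acc eid =>
    match pvSplitInt eid with
    | some p => acc ++ [p]
    | none => acc) []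

-- `sorted({n for t, n in pairs if t == typ})` of B's second loop
def pvGroupOf (pairs : List (String × Int)) (typ : String) : List Int :=
  PySem.List.sorted (PySem.Set.ofList ((pairs.filter (fun q => q.1 == typ)).map (fun q => q.2)))
    (fun x => x) false

-- B's second loop: at the first occurrence of a type, build its whole group from the pair list
def group_ids_by_model_py_alt (ids : List String) : List (String × List Int) :=
  ((pvPairsB ids).foldl (fun d p =>
      if d.contains p.1 then d
      else d.insert p.1 (pvGroupOf (pvPairsB ids) p.1)) PySem.Dict.empty).items

-- ===== PRECONDITION & SPEC =====
-- Pre_ excludes exactly the inputs where some id has no '_': there the bare tuple unpack of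
-- eid.split("_", 1) raises ValueError in both A and B.
def Pre_group_ids_by_model_py (ids : List String) : Prop := ∀ s ∈ ids, '_' ∈ s.toList
instance (ids : List String) : Decidable (Pre_group_ids_by_model_py ids) := by unfold Pre_group_ids_by_model_py; infer_instance
def pvWitness_group_ids_by_model_py : List String := ["task_3", "proj_2", "task_1", "task_3", "note_x", "proj_ 7 "]

def Spec_group_ids_by_model_py (ids : List String) (out : List (String × List Int)) : Prop := out = group_ids_by_model_py_alt ids
instance (ids : List String) (out : List (String × List Int)) : Decidable (Spec_group_ids_by_model_py ids out) := by unfold Spec_group_ids_by_model_py; infer_instance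

-- ===== CLAIM (what is proved, stated in full; the proofs are below) =====
def Claim_equal_group_ids_by_model_py : Prop := ∀ (ids : List String), Dom_group_ids_by_model_py ids → Pre_group_ids_by_model_py ids → Spec_group_ids_by_model_py ids (group_ids_by_model_py ids)

-- ===== LEMMAS AND PROOFS =====

-- the successfully parsed pairs, in order
def pvPairs (ids : List String) : List (String × Int) := ids.filterMap pvSplitInt

theorem foldl_pvSplitInt {β : Type} (ids : List String) (g : β → String × Int → β) (b : β) :
    ids.foldl (fun d eid =>
      match pvSplitInt eid with
      | some p => g d p
      | none => d) b = (pvPairs ids).foldl g b := by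
  induction ids generalizing b with
  | nil => rfl
  | cons x xs ih =>
    simp only [List.foldl_cons, pvPairs, List.filterMap_cons]
    cases pvSplitInt x <;> simp [ih, pvPairs]

theorem pvPairsB_aux (ids : List String) : ∀ acc : List (String × Int),
    ids.foldl (fun acc eid =>
      match pvSplitInt eid with
      | some p => acc ++ [p]
      | none => acc) acc = acc ++ pvPairs ids := by
  induction ids with
  | nil => intro acc; simp [pvPairs]
  | cons x xs ih =>
    intro acc
    simp only [List.foldl_cons, pvPairs, List.filterMap_cons]
    cases pvSplitInt x <;> simp [ih, pvPairs]

theorem pvPairsB_eq (ids : List String) : pvPairsB ids = pvPairs ids := by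
  simpa [pvPairsB] using pvPairsB_aux ids []

theorem bfold_get? (V : String → List Int) (l : List (String × Int))
    (d : PySem.Dict String (List Int)) (k : String) :
    (l.foldl (fun d p =>
      if d.contains p.1 then d
      else d.insert p.1 (V p.1)) d).get? k =
    if d.contains k then d.get? k
    else if k ∈ l.map (fun p => p.1) then some (V k) else none := by
  induction l generalizing d with
  | nil =>
    simp only [List.foldl_nil, List.map_nil, List.not_mem_nil, if_false]
    by_cases hd : d.contains k = true
    · rw [if_pos hd]
    · rw [if_neg hd]
      have h := PySem.Dict.contains_eq_isSome_get? d k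
      cases hg : d.get? k with
      | none => rfl
      | some v => rw [hg] at h; simp at h; exact absurd h hd
  | cons p rest ih =>
    simp only [List.foldl_cons]
    by_cases hc : d.contains p.1 = true
    · rw [if_pos hc, ih]
      by_cases hd : d.contains k = true
      · rw [if_pos hd, if_pos hd]
      · have hk : k ≠ p.1 := fun h => hd (h ▸ hc)
        rw [if_neg hd, if_neg hd]
        by_cases hm : k ∈ List.map (fun p => p.1) rest
        · simp [hm, List.mem_cons]
        · simp [hm, List.mem_cons, hk]
    · rw [if_neg hc, ih]
      by_cases hk : k = p.1
      · subst hk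
        rw [if_neg hc]
        simp [PySem.Dict.contains_insert_self, PySem.Dict.get?_insert_self, List.mem_cons]
      · have h1 : (d.insert p.1 (V p.1)).contains k = d.contains k := by
          simp [PySem.Dict.contains_insert, hk]
        rw [h1, PySem.Dict.get?_insert_of_ne d (V p.1) hk]
        by_cases hd : d.contains k = true
        · rw [if_pos hd, if_pos hd]
        · rw [if_neg hd, if_neg hd]
          by_cases hm : k ∈ List.map (fun p => p.1) rest
          · simp [hm, List.mem_cons]
          · simp [hm, List.mem_cons, hk]
  
theorem bfold_keys (V : String → List Int) (l : List (String × Int))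
    (d : PySem.Dict String (List Int)) :
    (l.foldl (fun d p =>
      if d.contains p.1 then d
      else d.insert p.1 (V p.1)) d).keys =
    PySem.Set.update d.keys (l.map (fun p => p.1)) := by
  induction l generalizing d with
  | nil => rfl
  | cons p rest ih =>
    simp only [List.foldl_cons, List.map_cons]
    by_cases hc : d.contains p.1 = true
    · rw [if_pos hc, ih]
      have hadd : PySem.Set.add d.keys p.1 = d.keys := by
        simp [PySem.Set.add, PySem.Set.contains,
          (PySem.Dict.contains_iff_mem_keys d p.1).mp hc]
      simp [PySem.Set.update, hadd]
    · rw [if_neg hc, ih]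
      have hm : p.1 ∉ d.keys := fun h => hc ((PySem.Dict.contains_iff_mem_keys d p.1).mpr h)
      have hadd : PySem.Set.add d.keys p.1 = d.keys ++ [p.1] := by
        simp [PySem.Set.add, PySem.Set.contains, hm]
      simp [PySem.Set.update, hadd,
        PySem.Dict.keys_insert_of_not_contains d (V p.1) (by simpa using hc)]

theorem bfold_nodup (V : String → List Int) (l : List (String × Int))
    (d : PySem.Dict String (List Int)) (h : d.keys.Nodup) :
    (l.foldl (fun d p =>
      if d.contains p.1 then d
      else d.insert p.1 (V p.1)) d).keys.Nodup := by
  induction l generalizing d with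
  | nil => exact h
  | cons p rest ih =>
    simp only [List.foldl_cons]
    by_cases hc : d.contains p.1 = true
    · rw [if_pos hc]; exact ih d h
    · rw [if_neg hc]
      exact ih _ (PySem.Dict.nodup_keys_insert d p.1 (V p.1) h)

theorem update_nil_eq_ofList (l : List String) :
    PySem.Set.update ([] : PySem.Set String) l = PySem.Set.ofList l := by
  rw [PySem.Set.ofList_eq_foldl]; rfl

theorem group_ids_by_model_py_eq (ids : List String) :
    group_ids_by_model_py ids = group_ids_by_model_py_alt ids := by
  unfold group_ids_by_model_py group_ids_by_model_py_alt
  rw [pvPairsB_eq, foldl_pvSplitInt]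
  have hnA := PySem.Dict.nodup_keys_foldl_modify_key (pvPairs ids) (fun p => p.1) []
    (fun _ p vs => vs ++ [p.2]) PySem.Dict.empty PySem.Dict.nodup_keys_empty
  have hnB := bfold_nodup (pvGroupOf (pvPairs ids)) (pvPairs ids) PySem.Dict.empty
    PySem.Dict.nodup_keys_empty
  rw [PySem.Dict.items_eq_map_keys _ hnA [], PySem.Dict.items_eq_map_keys _ hnB []]
  rw [PySem.Dict.keys_foldl_modify_key (pvPairs ids) (fun p => p.1) []
    (fun _ p vs => vs ++ [p.2]) PySem.Dict.empty]
  rw [bfold_keys (pvGroupOf (pvPairs ids)) (pvPairs ids) PySem.Dict.empty]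
  rw [List.map_map]
  apply List.map_congr_left
  intro k hk
  have hmem : k ∈ (pvPairs ids).map (fun p => p.1) := by
    rw [PySem.Dict.keys_empty, update_nil_eq_ofList] at hk
    exact (PySem.Set.mem_ofList _ k).mp hk
  have hgB : (List.foldl (fun d p =>
      if d.contains p.1 then d
      else d.insert p.1 (pvGroupOf (pvPairs ids) p.1)) PySem.Dict.empty (pvPairs ids)).getD k []
      = pvGroupOf (pvPairs ids) k := by
    rw [PySem.Dict.getD_eq_get?_getD,
      bfold_get? (pvGroupOf (pvPairs ids)) (pvPairs ids) PySem.Dict.empty k]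
    simp [PySem.Dict.contains_empty, hmem]
  have hgA : (List.foldl (fun d p => d.modify p.1 [] (fun vs => vs ++ [p.2]))
      PySem.Dict.empty (pvPairs ids)).getD k []
      = ((pvPairs ids).filter (fun p => p.1 == k)).map (fun x => x.2) := by
    have h := PySem.Dict.getD_foldl_modify_append (pvPairs ids) PySem.Dict.empty k
    simpa [PySem.Dict.getD_empty] using h
  simp only [Function.comp]
  rw [hgA, hgB]
  simp [pvGroupOf]

theorem group_ids_by_model_py_spec : Claim_equal_group_ids_by_model_py := by
  intro ids _ _
  unfold Spec_group_ids_by_model_py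
  exact group_ids_by_model_py_eq ids
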